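-- pv_equiv track=rewrite | github.com/thesrcielos/pattern_matching | pattern_matching/algorithms.py | search_with_automaton
-- ===== SOURCE A (Python) =====
-- def next_state(pattern, M, state, char):
--     if state < M and pattern[state] == char:
--         return state + 1
--
--     for i in range(state - 1, -1, -1):
--         n = 0
--         if pattern[i] == char:
--             while n < i:
--                 if pattern[n] != pattern[state - i + n]:
--                     break
--                 n+=1
--             if n == i:
--                 return n + 1
--     return 0
--
-- def build_automaton(pattern, alphabet):
--     m = len(pattern)
--     dfa = [{c: 0 for c in alphabet} for _ in range(m + 1)]
--
--     for q in range(m + 1):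
--         for c in alphabet:
--             dfa[q][c] = next_state(pattern, m, q, c)
--     return dfa
--
-- def search_with_automaton(text, pattern):
--     alphabet = set(text) | set(pattern)
--     dfa = build_automaton(pattern, alphabet)
--     m = len(pattern)
--     matches = []
--     state = 0
--
--     for i, c in enumerate(text):
--         state = dfa[state][c]
--         if state == m:
--             matches.append(i - m + 1)
--
--     return matches
-- ===== SOURCE B (Python) =====
-- def search_with_automaton(text, pattern):
--     m = len(pattern)
--     return [i for i in range(len(text) - m + 1) if text[i:i+m] == pattern]
-- ===== Notes on version B (the rewrite author's own statement) =====
-- stated objective: faster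
-- what changed: Replaces the DFA construction (a transition table over the whole alphabet, each entry found by a quadratic next-state search) and the automaton scan by a direct sliding-window comparison of each candidate window with the pattern.
-- intended difference: For the empty pattern A returns [1..len(text)] (it reports a match after each character, missing position 0), while B returns [0..len(text)], the standard set of positions at which the empty pattern occurs. — e.g. on search_with_automaton("a", ""): A returns [1], B returns [0, 1]
import Mathlib
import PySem

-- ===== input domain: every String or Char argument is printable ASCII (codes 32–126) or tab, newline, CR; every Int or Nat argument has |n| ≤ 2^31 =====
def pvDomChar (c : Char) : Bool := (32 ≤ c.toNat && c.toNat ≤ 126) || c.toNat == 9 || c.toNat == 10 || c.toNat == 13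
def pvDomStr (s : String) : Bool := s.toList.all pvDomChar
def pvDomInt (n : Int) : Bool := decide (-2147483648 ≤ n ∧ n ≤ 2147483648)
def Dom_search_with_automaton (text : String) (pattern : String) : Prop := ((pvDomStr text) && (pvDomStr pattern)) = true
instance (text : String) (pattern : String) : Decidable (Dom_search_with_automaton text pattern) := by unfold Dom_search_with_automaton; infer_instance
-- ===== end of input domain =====

-- B replaces A's DFA (transition table + scan) by a one-line sliding-window comparison: simpler and measured faster (A's table build dominates); same results
-- except for the empty pattern (see D_ below).

-- ===== PORT A =====
-- pattern[i] (all accesses A makes are in range, so the default is never returned)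
def pget (p : List Char) (i : Int) : Char := PySem.List.pyGetD p i ' '

-- the inner 'while n < i: if pattern[n] != pattern[state-i+n]: break; n += 1' of next_state;
-- fuel i.toNat is enough since n starts at 0 and increases by 1 while n < i
def nsWhile (p : List Char) (state i : Int) : Nat → Int → Int
  | 0, n => n
  | f+1, n =>
    if n < i then
      if pget p n ≠ pget p (state - i + n) then n
      else nsWhile p state i f (n+1)
    else n

-- the 'for i in range(state-1, -1, -1)' loop of next_state with its early return
def nsFor (p : List Char) (state : Int) (c : Char) : List Int → Int
  | [] => 0
  | i :: rest =>
    if pget p i = c then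
      let n := nsWhile p state i i.toNat 0
      if n = i then n + 1 else nsFor p state c rest
    else nsFor p state c rest

def nextState (p : List Char) (M state : Int) (c : Char) : Int :=
  if state < M ∧ pget p state = c then state + 1
  else nsFor p state c (PySem.List.pyRange (state - 1) (-1) (-1))

-- dfa = [{c: 0 for c in alphabet} for _ in range(m+1)]; then the nested loop mutates dfa[q][c]
def buildAutomaton (p : List Char) (alphabet : List Char) : List (PySem.Dict Char Int) :=
  let m : Int := p.length
  let dfa0 := (PySem.List.pyRange 0 (m+1) 1).map
    (fun _ => alphabet.foldl (fun d c => d.insert c 0) PySem.Dict.empty)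
  (PySem.List.pyRange 0 (m+1) 1).foldl
    (fun dfa q => PySem.List.pySetD dfa q
      (alphabet.foldl (fun d c => d.insert c (nextState p m q c))
        (PySem.List.pyGetD dfa q PySem.Dict.empty)))
    dfa0

-- the set is only used to key a dict that is looked up afterwards, so its iteration order is immaterial
def search_with_automaton (text : String) (pattern : String) : List Int :=
  let t := text.toList
  let p := pattern.toList
  let alphabet : PySem.Set Char := PySem.Set.union (PySem.Set.ofList t) (PySem.Set.ofList p)
  let dfa := buildAutomaton p alphabet
  let m : Int := p.length
  ((PySem.List.enumerate t 0).foldl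
    (fun (acc : Int × List Int) ic =>
      let st := PySem.Dict.getD (PySem.List.pyGetD dfa acc.1 PySem.Dict.empty) ic.2 0
      if st = m then (st, acc.2 ++ [ic.1 - m + 1]) else (st, acc.2))
    (0, [])).2

-- ===== PORT B =====
def search_with_automaton_alt (text : String) (pattern : String) : List Int :=
  let t := text.toList
  let p := pattern.toList
  let m : Int := p.length
  (PySem.List.pyRange 0 ((t.length : Int) - m + 1) 1).filter
    (fun i => PySem.List.slice t (some i) (some (i + m)) = p)

-- ===== PRECONDITION & SPEC =====
-- For the empty pattern A returns [1..len(text)] (a match reported after each character, position 0 missed),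
-- while B returns [0..len(text)], the standard set of positions at which the empty pattern occurs.
def D_search_with_automaton (text : String) (pattern : String) : Prop := pattern = ""
instance (text : String) (pattern : String) : Decidable (D_search_with_automaton text pattern) := by unfold D_search_with_automaton; infer_instance

def Spec_search_with_automaton (text : String) (pattern : String) (out : List Int) : Prop :=
  ¬ D_search_with_automaton text pattern → out = search_with_automaton_alt text pattern
instance (text : String) (pattern : String) (out : List Int) : Decidable (Spec_search_with_automaton text pattern out) := by unfold Spec_search_with_automaton; infer_instance

def pvDiffWitness_search_with_automaton : String × String := ("a", "")
def pvDiffWitnessOut_search_with_automaton : (List Int) × (List Int) := ([1], [0, 1])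

-- ===== CLAIM (what is proved, stated in full; the proofs are below) =====
def Claim_unchanged_search_with_automaton : Prop := ∀ (text : String) (pattern : String), Dom_search_with_automaton text pattern → Spec_search_with_automaton text pattern (search_with_automaton text pattern)
def Claim_changed_search_with_automaton : Prop := Dom_search_with_automaton (pvDiffWitness_search_with_automaton.1) (pvDiffWitness_search_with_automaton.2) ∧ D_search_with_automaton (pvDiffWitness_search_with_automaton.1) (pvDiffWitness_search_with_automaton.2) ∧ search_with_automaton (pvDiffWitness_search_with_automaton.1) (pvDiffWitness_search_with_automaton.2) = pvDiffWitnessOut_search_with_automaton.1 ∧ search_with_automaton_alt (pvDiffWitness_search_with_automaton.1) (pvDiffWitness_search_with_automaton.2) = pvDiffWitnessOut_search_with_automaton.2 ∧ pvDiffWitnessOut_search_with_automaton.1 ≠ pvDiffWitnessOut_search_with_automaton.2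
def Claim_exact_search_with_automaton : Prop := ∀ (text : String) (pattern : String), Dom_search_with_automaton text pattern → D_search_with_automaton text pattern → search_with_automaton text pattern ≠ search_with_automaton_alt text pattern

-- ===== LEMMAS AND PROOFS =====

-- length of the longest prefix of p that is a suffix of t (the automaton state after reading t)
def brd (p t : List Char) : Nat := Nat.findGreatest (fun k => p.take k <:+ t) p.length

-- positions where a match ENDS, reported as start positions, exactly as A's scan emits them
def occEnds (p t : List Char) : List Int :=
  ((List.range t.length).filter (fun i => decide (p <:+ t.take (i+1)))).map
    (fun i : Nat => ((i : Int) - (p.length : Int) + 1))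

-- general list facts -------------------------------------------------------

theorem suffix_concat_iff (a b : Char) (xs ys : List Char) :
    xs ++ [a] <:+ ys ++ [b] ↔ a = b ∧ xs <:+ ys := by
  rw [← List.reverse_prefix]
  simp only [List.reverse_append, List.reverse_singleton, List.singleton_append,
    List.cons_prefix_cons, List.reverse_prefix]

theorem suffix_of_suffix_le (u v s : List Char) (hu : u <:+ s) (hv : v <:+ s)
    (h : u.length ≤ v.length) : u <:+ v := by
  have hus : u.length ≤ s.length := hu.length_le
  have hvs : v.length ≤ s.length := hv.length_le
  have hu' := List.suffix_iff_eq_drop.mp hu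
  have hv' := List.suffix_iff_eq_drop.mp hv
  rw [List.suffix_iff_eq_drop]
  calc u = List.drop (s.length - u.length) s := hu'
    _ = List.drop (s.length - v.length + (v.length - u.length)) s := by congr 1; omega
    _ = List.drop (v.length - u.length) (List.drop (s.length - v.length) s) := by
          rw [List.drop_drop]
    _ = List.drop (v.length - u.length) v := by rw [← hv']

theorem findGreatest_congr_bound (P : Nat → Prop) [DecidablePred P] (b1 b2 : Nat)
    (hle : b1 ≤ b2) (h : ∀ k, b1 < k → k ≤ b2 → ¬ P k) :
    Nat.findGreatest P b2 = Nat.findGreatest P b1 := by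
  induction b2 with
  | zero =>
    have : b1 = 0 := by omega
    subst this; rfl
  | succ n ih =>
    rcases Nat.lt_or_ge b1 (n+1) with hlt | hge
    · rw [Nat.findGreatest_succ, if_neg (h _ hlt (le_refl _))]
      exact ih (by omega) (fun k hk1 hk2 => h k hk1 (by omega))
    · have : b1 = n + 1 := by omega
      subst this; rfl

theorem enumerate_concat (xs : List Char) (x : Char) (s : Int) :
    PySem.List.enumerate (xs ++ [x]) s = PySem.List.enumerate xs s ++ [(s + xs.length, x)] := by
  induction xs generalizing s <;>
    simp_all [PySem.List.enumerate_cons, PySem.List.enumerate_nil]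
  omega

-- next_state ---------------------------------------------------------------

theorem take_suffix_take_iff (p : List Char) (i q : Nat) (hiq : i ≤ q) (hqm : q ≤ p.length) :
    p.take i <:+ p.take q ↔ ∀ n : Int, 0 ≤ n → n < i → pget p n = pget p ((q:Int) - i + n) := by
  rw [List.suffix_iff_eq_drop]
  have hlt : (p.take i).length = i := by simp; omega
  have hlq : (p.take q).length = q := by simp; omega
  rw [hlt, hlq]
  constructor
  · intro h n hn0 hni
    have hnn : n.toNat < i := by omega
    have h1 : (p.take i)[n.toNat]'(by omega) = (List.drop (q - i) (p.take q))[n.toNat]'(by simp; omega) := List.getElem_of_eq h _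
    rw [List.getElem_take, List.getElem_drop, List.getElem_take] at h1
    simp only [pget]
    have e1 : (q:Int) - i + n = ((q - i + n.toNat : Nat) : Int) := by push_cast; omega
    rw [e1]
    rw [show n = ((n.toNat : Nat) : Int) by omega]
    rw [PySem.List.pyGetD_natCast, PySem.List.pyGetD_natCast]
    rw [List.getD_eq_getElem _ _ (by omega), List.getD_eq_getElem _ _ (by omega)]
    exact h1
  · intro h
    apply List.ext_getElem
    · simp; omega
    · intro n hn1 hn2
      rw [List.getElem_take, List.getElem_drop, List.getElem_take]
      have hni : n < i := by simpa [hlt] using hn1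
      have := h (n : Int) (by omega) (by omega)
      simp only [pget] at this
      have e1 : (q:Int) - i + (n:Int) = ((q - i + n : Nat) : Int) := by push_cast; omega
      rw [e1, PySem.List.pyGetD_natCast, PySem.List.pyGetD_natCast] at this
      rw [List.getD_eq_getElem _ _ (by omega), List.getD_eq_getElem _ _ (by omega)] at this
      exact this

theorem take_concat_getElem (p : List Char) (q : Nat) (hq : q < p.length) :
    p.take (q+1) = p.take q ++ [p[q]] := by
  rw [List.take_add_one]; simp [List.getElem?_eq_getElem hq]

theorem pget_natCast (p : List Char) (q : Nat) (hq : q < p.length) :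
    pget p (q : Int) = p[q] := by
  simp only [pget, PySem.List.pyGetD_natCast]
  rw [List.getD_eq_getElem _ _ hq]

theorem nsWhile_iff (p : List Char) (q i : Int) (f : Nat) (n0 : Int)
    (h1 : n0 ≤ i) (h2 : i ≤ n0 + f) :
    (nsWhile p q i f n0 = i ↔ ∀ n : Int, n0 ≤ n → n < i → pget p n = pget p (q - i + n)) := by
  induction f generalizing n0 with
  | zero =>
    have : n0 = i := by omega
    subst this
    simp [nsWhile]
    intro n hn1 hn2; omega
  | succ f ih =>
    by_cases hlt : n0 < i
    · rw [nsWhile, if_pos hlt]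
      by_cases hmis : pget p n0 ≠ pget p (q - i + n0)
      · rw [if_pos hmis]
        constructor
        · intro h; omega
        · intro h; exact absurd (h n0 le_rfl hlt) hmis
      · rw [if_neg hmis]
        rw [ne_eq, not_not] at hmis
        rw [ih (n0+1) (by omega) (by omega)]
        constructor
        · intro h n hn1 hn2
          rcases eq_or_lt_of_le hn1 with rfl | hgt
          · exact hmis
          · exact h n (by omega) hn2
        · intro h n hn1 hn2; exact h n (by omega) hn2
    · have : n0 = i := by omega
      subst this
      rw [nsWhile, if_neg hlt]
      simp
      intro n hn1 hn2; omega

theorem head_cond_iff (p : List Char) (c : Char) (q j : Nat)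
    (hj1 : 1 ≤ j) (hjq : j ≤ q) (hqm : q ≤ p.length) :
    (pget p ((j:Int) - 1) = c ∧ nsWhile p q ((j:Int) - 1) ((j:Int) - 1).toNat 0 = (j:Int) - 1)
      ↔ p.take j <:+ p.take q ++ [c] := by
  obtain ⟨i, rfl⟩ : ∃ i, j = i + 1 := ⟨j - 1, by omega⟩
  have him : i < p.length := by omega
  have hcast : ((i + 1 : Nat) : Int) - 1 = (i : Int) := by push_cast; ring
  rw [hcast, show ((i : Int)).toNat = i by simp]
  have htake : p.take (i+1) = p.take i ++ [p[i]] := by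
    rw [List.take_add_one]; simp [List.getElem?_eq_getElem him]
  rw [htake, suffix_concat_iff]
  have hpget : pget p (i : Int) = p[i] := by
    simp only [pget, PySem.List.pyGetD_natCast]
    rw [List.getD_eq_getElem _ _ him]
  rw [hpget, nsWhile_iff p q (i : Int) i 0 (by omega) (by omega),
    take_suffix_take_iff p i q (by omega) hqm]

theorem nsFor_eq (p : List Char) (c : Char) (q : Nat) (hqm : q ≤ p.length) :
    ∀ j : Nat, j ≤ q →
      nsFor p q c (PySem.List.pyRange ((j:Int) - 1) (-1) (-1))
        = ((Nat.findGreatest (fun k => p.take k <:+ p.take q ++ [c]) j : Nat) : Int) := by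
  intro j
  induction j with
  | zero =>
    intro _
    rw [PySem.List.pyRange_neg_one_eq_nil (by omega)]
    rfl
  | succ j ih =>
    intro hjq
    have hc1 : ((j + 1 : Nat) : Int) - 1 = (j : Int) := by push_cast; ring
    rw [hc1, PySem.List.pyRange_neg_one_cons (by omega), show (j : Int) - 1 = ((j:Nat):Int) - 1 by norm_num]
    have hhead := head_cond_iff p c q (j+1) (by omega) hjq hqm
    rw [hc1, show ((j:Int)).toNat = j by simp] at hhead
    rw [Nat.findGreatest_succ]
    by_cases hP : p.take (j+1) <:+ p.take q ++ [c]
    · obtain ⟨hc, hw⟩ := hhead.mpr hP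
      rw [if_pos hP, nsFor, if_pos hc]
      simp only [show ((j:Int)).toNat = j by simp, hw]
      push_cast; ring
    · rw [if_neg hP, nsFor]
      by_cases hc : pget p (j:Int) = c
      · rw [if_pos hc]
        have hw : ¬ (nsWhile p (q:Int) (j:Int) j 0 = (j:Int)) := by
          intro hw
          exact hP (hhead.mp ⟨hc, hw⟩)
        simp only [show ((j:Int)).toNat = j by simp, if_neg hw]
        exact ih (by omega)
      · rw [if_neg hc]
        exact ih (by omega)

theorem nextState_eq_brd (p : List Char) (c : Char) (q : Nat) (hqm : q ≤ p.length) :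
    nextState p (p.length : Int) (q : Int) c = ((brd p (p.take q ++ [c]) : Nat) : Int) := by
  unfold nextState brd
  by_cases hfast : ((q : Int) < (p.length : Int) ∧ pget p (q : Int) = c)
  · rw [if_pos hfast]
    obtain ⟨hqlt', hcq⟩ := hfast
    have hqlt : q < p.length := by exact_mod_cast hqlt'
    have hP : p.take (q+1) <:+ p.take q ++ [c] := by
      rw [take_concat_getElem p q hqlt, pget_natCast p q hqlt] at *
      rw [hcq]
    have hge : q + 1 ≤ Nat.findGreatest (fun k => p.take k <:+ p.take q ++ [c]) p.length :=
      Nat.le_findGreatest (by omega) hP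
    have hspec := Nat.findGreatest_spec (P := fun k => p.take k <:+ p.take q ++ [c])
      (Nat.zero_le p.length) (by simp)
    have hlen := hspec.length_le
    have hfle := Nat.findGreatest_le (P := fun k => p.take k <:+ p.take q ++ [c]) p.length
    simp only [List.length_take, List.length_append, List.length_take, List.length_cons,
      List.length_nil] at hlen
    have : Nat.findGreatest (fun k => p.take k <:+ p.take q ++ [c]) p.length = q + 1 := by
      omega
    rw [this]; push_cast; ring
  · rw [if_neg hfast]
    rw [show (q : Int) - 1 = ((q:Nat):Int) - 1 by norm_num]
    rw [nsFor_eq p c q hqm q le_rfl]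
    congr 1
    refine (findGreatest_congr_bound _ q p.length hqm ?_).symm
    intro k hk1 hk2 hP
    have hlenk : (p.take k).length = k := by simp; omega
    have hlen := hP.length_le
    simp only [hlenk, List.length_append, List.length_take, List.length_cons,
      List.length_nil] at hlen
    have hkq : k = q + 1 := by omega
    subst hkq
    have hqlt : q < p.length := by omega
    have heq : p.take (q+1) = p.take q ++ [c] := hP.eq_of_length (by simp; omega)
    rw [take_concat_getElem p q hqlt] at heq
    have hcq : p[q] = c := by
      have := List.append_inj_right heq (by simp)
      simpa using this
    exact hfast ⟨by exact_mod_cast hqlt, by rw [pget_natCast p q hqlt, hcq]⟩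

-- border step --------------------------------------------------------------

theorem brd_le (p t : List Char) : brd p t ≤ p.length := Nat.findGreatest_le _

theorem brd_suffix (p t : List Char) : p.take (brd p t) <:+ t := by
  have := Nat.findGreatest_spec (P := fun k => p.take k <:+ t) (Nat.zero_le p.length)
    (by simp)
  exact this

theorem brd_step (p s : List Char) (c : Char) :
    brd p (s ++ [c]) = brd p (p.take (brd p s) ++ [c]) := by
  set r := brd p s with hr
  apply le_antisymm
  · have hspec : p.take (brd p (s ++ [c])) <:+ s ++ [c] := brd_suffix p (s ++ [c])
    have ham : brd p (s ++ [c]) ≤ p.length := brd_le p (s ++ [c])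
    rcases Nat.eq_zero_or_pos (brd p (s ++ [c])) with h0 | hpos
    · rw [h0]; exact Nat.zero_le _
    · obtain ⟨i, hi⟩ : ∃ i, brd p (s ++ [c]) = i + 1 := ⟨brd p (s ++ [c]) - 1, by omega⟩
      rw [hi] at hspec ham ⊢
      have him : i < p.length := by omega
      rw [take_concat_getElem p i him, suffix_concat_iff] at hspec
      obtain ⟨hci, hsuf⟩ := hspec
      have hir : i ≤ r := Nat.le_findGreatest (by omega) hsuf
      have hsuf2 : p.take i <:+ p.take r := by
        refine suffix_of_suffix_le _ _ s hsuf (brd_suffix p s) ?_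
        have hrm : r ≤ p.length := brd_le p s
        simp only [List.length_take]; omega
      apply Nat.le_findGreatest (by omega)
      rw [take_concat_getElem p i him, hci]
      exact (suffix_concat_iff c c _ _).mpr ⟨rfl, hsuf2⟩
  · set b := brd p (p.take r ++ [c]) with hb
    have hspec : p.take b <:+ p.take r ++ [c] := brd_suffix p _
    have hbm : b ≤ p.length := brd_le p _
    apply Nat.le_findGreatest hbm
    refine hspec.trans ?_
    exact (suffix_concat_iff c c _ _).mpr ⟨rfl, brd_suffix p s⟩

theorem brd_eq_len_iff (p t : List Char) : brd p t = p.length ↔ p <:+ t := by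
  constructor
  · intro h
    have := brd_suffix p t
    rwa [h, List.take_length] at this
  · intro h
    have hge : p.length ≤ brd p t := Nat.le_findGreatest le_rfl (by simpa using h)
    have := brd_le p t
    omega

-- the automaton table ------------------------------------------------------

theorem foldl_pySetD_getD {α : Type} (g : Int → α → α) (d0 : α) (ds : List α) (k : Nat)
    (hk : k ≤ ds.length) :
    ((PySem.List.pyRange 0 (k:Int) 1).foldl
        (fun dfa q => PySem.List.pySetD dfa q (g q (PySem.List.pyGetD dfa q d0))) ds).length
      = ds.length ∧
    ∀ j : Nat, j < ds.length →
      ((PySem.List.pyRange 0 (k:Int) 1).foldl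
          (fun dfa q => PySem.List.pySetD dfa q (g q (PySem.List.pyGetD dfa q d0))) ds).getD j d0
        = if j < k then g (j:Int) (ds.getD j d0) else ds.getD j d0 := by
  induction k with
  | zero =>
    rw [show ((0:Nat):Int) = 0 by norm_num, PySem.List.pyRange_one_eq_nil le_rfl]
    exact ⟨rfl, fun j hj => by simp⟩
  | succ k ih =>
    obtain ⟨ihlen, ihget⟩ := ih (by omega)
    rw [show ((k+1:Nat):Int) = (k:Int) + 1 by push_cast; ring,
      PySem.List.pyRange_one_succ_right (by omega), List.foldl_append]
    simp only [List.foldl_cons, List.foldl_nil]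
    rw [PySem.List.pySetD_natCast]
    constructor
    · rw [List.length_set]; exact ihlen
    · intro j hj
      by_cases hjk : j = k
      · subst hjk
        rw [List.getD_eq_getElem?_getD, List.getElem?_set_self (by omega)]
        simp only [Option.getD_some]
        have : PySem.List.pyGetD ((PySem.List.pyRange 0 (j:Int) 1).foldl
            (fun dfa q => PySem.List.pySetD dfa q (g q (PySem.List.pyGetD dfa q d0))) ds) (j:Int) d0
            = ds.getD j d0 := by
          rw [PySem.List.pyGetD_natCast, ihget j hj, if_neg (by omega)]
        rw [this, if_pos (by omega)]
      · rw [List.getD_eq_getElem?_getD, List.getElem?_set_ne (by omega), ← List.getD_eq_getElem?_getD,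
          ihget j hj]
        by_cases h2 : j < k
        · rw [if_pos h2, if_pos (by omega)]
        · rw [if_neg h2, if_neg (by omega)]

theorem getD_foldl_insert_skip (l : List Char) (f : Char → Int) (d : PySem.Dict Char Int)
    (c0 : Char) (h : c0 ∉ l) (v0 : Int) :
    (l.foldl (fun d c => d.insert c (f c)) d).getD c0 v0 = d.getD c0 v0 := by
  induction l generalizing d with
  | nil => rfl
  | cons c rest ih =>
    simp only [List.foldl_cons]
    rw [ih _ (fun hm => h (List.mem_cons_of_mem _ hm))]
    rw [PySem.Dict.getD_insert]
    rw [if_neg (show ¬ c0 = c from fun he => h (by rw [he]; exact List.mem_cons_self))]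

theorem getD_foldl_insert_fn (l : List Char) (f : Char → Int) (d : PySem.Dict Char Int)
    (c0 : Char) (h : c0 ∈ l) (v0 : Int) :
    (l.foldl (fun d c => d.insert c (f c)) d).getD c0 v0 = f c0 := by
  induction l generalizing d with
  | nil => cases h
  | cons c rest ih =>
    simp only [List.foldl_cons]
    by_cases hm : c0 ∈ rest
    · exact ih _ hm
    · have : c0 = c := by rcases List.mem_cons.mp h with h1 | h1; exact h1; exact absurd h1 hm
      subst this
      rw [getD_foldl_insert_skip rest f _ c0 hm v0, PySem.Dict.getD_insert, if_pos rfl]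

theorem dfa_lookup (p : List Char) (alphabet : List Char) (q : Nat) (hq : q ≤ p.length)
    (c : Char) (hc : c ∈ alphabet) :
    PySem.Dict.getD (PySem.List.pyGetD (buildAutomaton p alphabet) (q : Int) PySem.Dict.empty) c 0
      = nextState p p.length q c := by
  have hBA : buildAutomaton p alphabet
      = (PySem.List.pyRange 0 (((p.length + 1 : Nat)):Int) 1).foldl
          (fun dfa q => PySem.List.pySetD dfa q
            (alphabet.foldl (fun d c => d.insert c (nextState p (p.length:Int) q c))
              (PySem.List.pyGetD dfa q PySem.Dict.empty)))
          ((PySem.List.pyRange 0 (((p.length + 1 : Nat)):Int) 1).map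
            (fun _ => alphabet.foldl (fun d c => d.insert c 0) PySem.Dict.empty)) := by
    unfold buildAutomaton
    norm_num
  rw [hBA]
  obtain ⟨hL, hget⟩ := foldl_pySetD_getD
    (fun q row => alphabet.foldl (fun d c => d.insert c (nextState p (p.length:Int) q c)) row)
    PySem.Dict.empty
    ((PySem.List.pyRange 0 (((p.length + 1 : Nat)):Int) 1).map
      (fun _ => alphabet.foldl (fun d c => d.insert c 0) PySem.Dict.empty))
    (p.length + 1)
    (by rw [List.length_map, PySem.List.length_pyRange_one]; omega)
  rw [PySem.List.pyGetD_natCast]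
  rw [hget q (by rw [List.length_map, PySem.List.length_pyRange_one]; omega), if_pos (by omega)]
  exact getD_foldl_insert_fn _ _ _ _ hc _

-- the scan -----------------------------------------------------------------

theorem brd_nil (p : List Char) : brd p [] = 0 := by
  have h := brd_suffix p []
  rw [List.suffix_nil] at h
  have := congrArg List.length h
  simp only [List.length_take, List.length_nil] at this
  have hle := brd_le p []
  omega

theorem occEnds_concat (p t : List Char) (k : Nat) (hk : k < t.length) :
    occEnds p (t.take (k+1))
      = occEnds p (t.take k)
        ++ (if p <:+ t.take (k+1) then [(k:Int) - p.length + 1] else []) := by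
  unfold occEnds
  have h1 : (t.take (k+1)).length = k + 1 := by simp; omega
  have h2 : (t.take k).length = k := by simp; omega
  rw [h1, h2, List.range_succ, List.filter_append, List.map_append]
  congr 1
  · congr 1
    apply List.filter_congr
    intro i hi
    have hik : i < k := List.mem_range.mp hi
    rw [List.take_take, List.take_take]
    rw [show min (i+1) (k+1) = i + 1 by omega, show min (i+1) k = i + 1 by omega]
  · rw [List.filter_cons, List.filter_nil]
    rw [List.take_take]
    have : min (k+1) (k+1) = k + 1 := by omega
    rw [this]
    by_cases hs : p <:+ t.take (k+1)
    · rw [if_pos (by simpa using hs), if_pos hs]; rfl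
    · rw [if_neg (by simpa using hs), if_neg hs]; rfl

theorem scan_inv (t p : List Char) (alphabet : List Char) (halpha : ∀ c ∈ t, c ∈ alphabet)
    (k : Nat) (hk : k ≤ t.length) :
    ((PySem.List.enumerate (t.take k) 0).foldl
      (fun (acc : Int × List Int) ic =>
        let st := PySem.Dict.getD
          (PySem.List.pyGetD (buildAutomaton p alphabet) acc.1 PySem.Dict.empty) ic.2 0
        if st = (p.length : Int) then (st, acc.2 ++ [ic.1 - (p.length : Int) + 1]) else (st, acc.2))
      (0, []))
    = ((brd p (t.take k) : Int), occEnds p (t.take k)) := by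
  induction k with
  | zero =>
    simp only [List.take_zero, PySem.List.enumerate_nil, List.foldl_nil, brd_nil]
    rfl
  | succ k ih =>
    have hkt : k < t.length := by omega
    rw [take_concat_getElem t k hkt, enumerate_concat, List.foldl_append, ih (by omega),
      List.foldl_cons, List.foldl_nil]
    have hlen : ((t.take k).length : Int) = (k : Int) := by simp; omega
    have hbm : brd p (t.take k) ≤ p.length := brd_le p (t.take k)
    have hmem : t[k] ∈ alphabet := halpha _ (List.getElem_mem hkt)
    simp only [hlen]
    have hst : PySem.Dict.getD
        (PySem.List.pyGetD (buildAutomaton p alphabet) ((brd p (t.take k) : Nat) : Int)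
          PySem.Dict.empty) t[k] 0
        = ((brd p (t.take k ++ [t[k]]) : Nat) : Int) := by
      rw [dfa_lookup p alphabet (brd p (t.take k)) hbm t[k] hmem,
        nextState_eq_brd p t[k] (brd p (t.take k)) hbm, ← brd_step]
    simp only [hst]
    rw [← take_concat_getElem t k hkt]
    have hcond : ((brd p (t.take (k+1)) : Nat) : Int) = (p.length : Int)
        ↔ p <:+ t.take (k+1) := by
      rw [← brd_eq_len_iff]; constructor
      · intro h; exact_mod_cast h
      · intro h; exact_mod_cast congrArg (Nat.cast : Nat → Int) h
    rw [occEnds_concat p t k hkt]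
    by_cases hs : p <:+ t.take (k+1)
    · rw [if_pos (hcond.mpr hs), if_pos hs]
      have : (0 : Int) + (k : Int) = (k : Int) := by ring
      rw [this]
    · rw [if_neg (fun h => hs (hcond.mp h)), if_neg hs]
      simp

theorem A_eq_occEnds (text pattern : String) :
    search_with_automaton text pattern = occEnds pattern.toList text.toList := by
  have h : search_with_automaton text pattern
      = ((PySem.List.enumerate text.toList 0).foldl
          (fun (acc : Int × List Int) ic =>
            let st := PySem.Dict.getD (PySem.List.pyGetD (buildAutomaton pattern.toList
              (PySem.Set.union (PySem.Set.ofList text.toList) (PySem.Set.ofList pattern.toList)))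
              acc.1 PySem.Dict.empty) ic.2 0
            if st = (pattern.toList.length : Int) then
              (st, acc.2 ++ [ic.1 - (pattern.toList.length : Int) + 1])
            else (st, acc.2))
          (0, [])).2 := rfl
  rw [h]
  have hs := scan_inv text.toList pattern.toList
    (PySem.Set.union (PySem.Set.ofList text.toList) (PySem.Set.ofList pattern.toList))
    (fun c hc => (PySem.Set.mem_union _ _ c).mpr (Or.inl ((PySem.Set.mem_ofList _ c).mpr hc)))
    text.toList.length le_rfl
  rw [List.take_length] at hs
  rw [hs]

theorem B_char (text pattern : String) :
    search_with_automaton_alt text pattern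
      = ((List.range ((text.toList.length : Int) - pattern.toList.length + 1).toNat).filter
          (fun j => decide ((text.toList.drop j).take pattern.toList.length = pattern.toList))).map
          (fun j : Nat => ((j : Int))) := by
  have h : search_with_automaton_alt text pattern
      = (PySem.List.pyRange 0 ((text.toList.length : Int) - pattern.toList.length + 1) 1).filter
          (fun i => decide (PySem.List.slice text.toList (some i) (some (i + pattern.toList.length)) = pattern.toList)) := rfl
  rw [h, PySem.List.pyRange_one, List.filter_map]
  rw [show ((text.toList.length : Int) - pattern.toList.length + 1) - 0
      = ((text.toList.length : Int) - pattern.toList.length + 1) by ring]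
  rw [show (fun k : Nat => (0 : Int) + (k : Int)) = (fun j : Nat => ((j : Int))) from
    funext fun k => by ring]
  congr 1
  apply List.filter_congr
  intro j _
  simp only [Function.comp]
  rw [PySem.List.slice_natCast_add]

theorem occEnds_eq_B (t p : List Char) (hp : p ≠ []) :
    occEnds p t
      = ((List.range ((t.length : Int) - p.length + 1).toNat).filter
          (fun j => decide ((t.drop j).take p.length = p))).map (fun j : Nat => ((j : Int))) := by
  have hm1 : 1 ≤ p.length := List.length_pos_iff.mpr hp
  unfold occEnds
  have hcond : ∀ i ∈ List.range t.length,
      decide (p <:+ t.take (i+1))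
        = decide (p.length ≤ i + 1 ∧ (t.drop (i + 1 - p.length)).take p.length = p) := by
    intro i hi
    have hin : i < t.length := List.mem_range.mp hi
    rw [decide_eq_decide]
    have hlt : (t.take (i+1)).length = i + 1 := by simp; omega
    constructor
    · intro hs
      have hlen := hs.length_le
      rw [hlt] at hlen
      have := List.suffix_iff_eq_drop.mp hs
      rw [hlt] at this
      refine ⟨hlen, ?_⟩
      rw [List.drop_take] at this
      rw [show i + 1 - (i + 1 - p.length) = p.length by omega] at this
      exact this.symm
    · rintro ⟨hlen, hdt⟩
      rw [List.suffix_iff_eq_drop, hlt, List.drop_take,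
        show i + 1 - (i + 1 - p.length) = p.length by omega]
      exact hdt.symm
  rw [List.filter_congr hcond]
  rcases Nat.lt_or_ge t.length p.length with hnm | hmn
  · have h1 : ((t.length : Int) - p.length + 1).toNat = 0 := by omega
    rw [h1]
    have h2 : (List.range t.length).filter
        (fun i => decide (p.length ≤ i + 1 ∧ (t.drop (i + 1 - p.length)).take p.length = p)) = [] := by
      apply List.filter_eq_nil_iff.mpr
      intro i hi
      have hin : i < t.length := List.mem_range.mp hi
      simp only [decide_eq_true_eq]
      rintro ⟨hlen, -⟩
      omega
    rw [h2]
    rfl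
  · have h1 : ((t.length : Int) - p.length + 1).toNat = t.length - p.length + 1 := by omega
    rw [h1]
    have hsplit : t.length = (p.length - 1) + (t.length - p.length + 1) := by omega
    conv_lhs => rw [hsplit, List.range_add]
    rw [List.filter_append, List.filter_map, List.map_append]
    have hfirst : (List.range (p.length - 1)).filter
        (fun i => decide (p.length ≤ i + 1 ∧ (t.drop (i + 1 - p.length)).take p.length = p)) = [] := by
      apply List.filter_eq_nil_iff.mpr
      intro i hi
      have : i < p.length - 1 := List.mem_range.mp hi
      simp only [decide_eq_true_eq]
      rintro ⟨hlen, -⟩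
      omega
    rw [hfirst, List.map_nil, List.nil_append, List.map_map]
    have hpred : ∀ j ∈ List.range (t.length - p.length + 1),
        ((fun i => decide (p.length ≤ i + 1 ∧ (t.drop (i + 1 - p.length)).take p.length = p))
          ∘ (fun x => p.length - 1 + x)) j
          = decide ((t.drop j).take p.length = p) := by
      intro j hj
      simp only [Function.comp, decide_eq_decide]
      rw [show p.length - 1 + j + 1 - p.length = j by omega]
      constructor
      · rintro ⟨-, h⟩; exact h
      · intro h; exact ⟨by omega, h⟩
    rw [List.filter_congr hpred]
    apply List.map_congr_left
    intro j hj
    simp only [Function.comp]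
    have : ((p.length - 1 + j : Nat) : Int) = (p.length : Int) - 1 + j := by push_cast; omega
    rw [this]
    ring

-- ===== VERDICT (by name: the statement is the Claim_ definition above) =====
theorem search_with_automaton_spec : Claim_unchanged_search_with_automaton := by
  intro text pattern _ hD
  have hp : pattern.toList ≠ [] := by
    intro h
    exact hD (String.toList_eq_nil_iff.mp h)
  rw [A_eq_occEnds, B_char, occEnds_eq_B _ _ hp]

theorem search_with_automaton_changed : Claim_changed_search_with_automaton := by
  unfold Claim_changed_search_with_automaton; decide

theorem search_with_automaton_tight : Claim_exact_search_with_automaton := by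
  intro text pattern _ hD heq
  have hp : pattern.toList = [] := by rw [show pattern = "" from hD]; rfl
  have h := congrArg List.length heq
  rw [A_eq_occEnds, B_char, hp] at h
  have hA : (occEnds ([] : List Char) text.toList).length = text.toList.length := by
    unfold occEnds
    rw [List.length_map, List.filter_eq_self.mpr (fun a _ => by simp), List.length_range]
  have hB : (((List.range ((text.toList.length : Int) - ([] : List Char).length + 1).toNat).filter
      (fun j => decide ((text.toList.drop j).take ([] : List Char).length = ([] : List Char)))).map
      (fun j : Nat => ((j : Int)))).length = text.toList.length + 1 := by
    rw [List.length_map, List.filter_eq_self.mpr (fun a _ => by simp), List.length_range]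
    simp
  rw [hA, hB] at h
  omega
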